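-- pv_equiv track=rewrite | github.com/ryandeford/samples | languages/python/basics.py | max_pair_indices
-- ===== SOURCE A (Python) =====
-- def max_pair_indices(items: list):
--     if len(items) < 2:
--         return None
--     elif len(items) == 2:
--         return [0, 1]
--     else:
--         max_sum = items[0] + items[1]
--         max_indices = [0, 1]
--
--         for i in range(2, len(items)):
--             current_sum = items[i] + items[i - 1]
--             if current_sum > max_sum:
--                 max_sum = current_sum
--                 max_indices = [i - 1, i]
--
--         return max_indices
-- ===== SOURCE B (Python) =====
-- def max_pair_indices(items: list):
--     sums = [a + b for a, b in zip(items, items[1:])]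
--     if not sums:
--         return None
--     idx = sums.index(max(sums))
--     return [idx, idx + 1]
-- ===== Notes on version B (the rewrite author's own statement) =====
-- stated objective: simpler
-- what changed: Replaces the index-based running-max loop with a two-phase decomposition: build the adjacent-pair sums list once, then return the first index of its maximum via max/index.
import Mathlib
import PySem

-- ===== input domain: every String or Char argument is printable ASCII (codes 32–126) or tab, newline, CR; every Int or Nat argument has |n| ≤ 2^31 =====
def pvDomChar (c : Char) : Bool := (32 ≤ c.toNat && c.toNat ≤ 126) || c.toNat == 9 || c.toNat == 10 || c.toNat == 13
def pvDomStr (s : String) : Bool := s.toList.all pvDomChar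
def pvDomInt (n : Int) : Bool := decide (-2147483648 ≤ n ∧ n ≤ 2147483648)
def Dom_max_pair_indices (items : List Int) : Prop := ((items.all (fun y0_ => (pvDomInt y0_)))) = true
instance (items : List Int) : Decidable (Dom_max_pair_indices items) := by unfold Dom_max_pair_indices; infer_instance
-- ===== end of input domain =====

-- B replaces A's index-based running-max loop by building the adjacent-pair-sum list once and
-- returning the first index of its maximum (simpler two-phase decomposition; same O(n) cost).

-- ===== PORT A =====
-- loop body of A's 'for i in range(2, len(items))'
def pvStepA (items : List Int) (st : Int × List Int) (i : Int) : Int × List Int :=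
  let current_sum := PySem.List.pyGetD items i 0 + PySem.List.pyGetD items (i - 1) 0
  if st.1 < current_sum then (current_sum, [i - 1, i]) else st

def max_pair_indices (items : List Int) : Option (List Int) :=
  if items.length < 2 then none
  else if items.length = 2 then some [0, 1]
  else
    some (((PySem.List.pyRange 2 (items.length : Int) 1).foldl (pvStepA items)
      (PySem.List.pyGetD items 0 0 + PySem.List.pyGetD items 1 0, [0, 1])).2)

-- ===== PORT B =====
-- sums = [a + b for a, b in zip(items, items[1:])]
def pvSums (l : List Int) : List Int := List.zipWith (· + ·) l (l.drop 1)

def max_pair_indices_alt (items : List Int) : Option (List Int) :=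
  let sums := pvSums items
  match PySem.List.max? sums (fun x => x) with
  | none => none                                  -- 'if not sums: return None'
  | some m =>
    match PySem.List.index? sums m with
    | none => none                                -- unreachable: max(sums) ∈ sums
    | some idx => some [(idx : Int), (idx : Int) + 1]

-- ===== PRECONDITION & SPEC =====
def Spec_max_pair_indices (items : List Int) (out : Option (List Int)) : Prop := out = max_pair_indices_alt items
instance (items : List Int) (out : Option (List Int)) : Decidable (Spec_max_pair_indices items out) := by unfold Spec_max_pair_indices; infer_instance

-- ===== CLAIM (what is proved, stated in full; the proofs are below) =====
def Claim_equal_max_pair_indices : Prop := ∀ (items : List Int), Dom_max_pair_indices items → Spec_max_pair_indices items (max_pair_indices items)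

-- ===== LEMMAS AND PROOFS =====

lemma pvSums_cons_cons (a b : Int) (t : List Int) :
    pvSums (a :: b :: t) = (a + b) :: pvSums (b :: t) := by
  simp [pvSums]

lemma pvSums_append (l : List Int) (h : l ≠ []) (x : Int) :
    pvSums (l ++ [x]) = pvSums l ++ [l.getLast h + x] := by
  induction l with
  | nil => exact absurd rfl h
  | cons a t ih =>
    cases t with
    | nil => simp [pvSums]
    | cons b t' =>
      have hb : (b :: t') ≠ [] := by simp
      simp only [List.cons_append]
      rw [pvSums_cons_cons, pvSums_cons_cons,
          show b :: (t' ++ [x]) = (b :: t') ++ [x] from rfl, ih hb]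
      simp [List.getLast_cons]

lemma pvSums_length (l : List Int) : (pvSums l).length = l.length - 1 := by
  simp [pvSums]

lemma pvGetD_append_left (l t : List Int) (i : Int) (h0 : 0 ≤ i) (h : i < l.length) :
    PySem.List.pyGetD (l ++ t) i 0 = PySem.List.pyGetD l i 0 := by
  rw [PySem.List.pyGetD_eq_getElem (l ++ t) 0 h0 (by simp; omega),
      PySem.List.pyGetD_eq_getElem l 0 h0 h]
  exact List.getElem_append_left (by omega)

-- the invariant of A's loop: its state is (max of pvSums, first index of that max)
lemma loopA_inv (items : List Int) (h2 : 2 ≤ items.length) :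
    ∃ (M : Int) (k : Nat),
      M ∈ pvSums items ∧ (∀ y ∈ pvSums items, y ≤ M) ∧
      PySem.List.index? (pvSums items) M = some k ∧
      (PySem.List.pyRange 2 (items.length : Int) 1).foldl (pvStepA items)
        (PySem.List.pyGetD items 0 0 + PySem.List.pyGetD items 1 0, [0, 1])
        = (M, [(k : Int), (k : Int) + 1]) := by
  induction items using List.reverseRecOn with
  | nil => simp at h2
  | append_singleton ys x ih =>
    rcases Nat.lt_or_ge ys.length 2 with h1 | hge
    · -- base: ys = [a], items = [a, x]
      have hy1 : ys.length = 1 := by simp at h2; omega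
      obtain ⟨a, ha⟩ := List.length_eq_one_iff.mp hy1
      subst ha
      refine ⟨a + x, 0, by simp [pvSums], by simp [pvSums], ?_, ?_⟩
      · simp [pvSums]
      · rw [show (([a] ++ [x]).length : Int) = 2 by simp,
            PySem.List.pyRange_one_eq_nil (le_refl 2)]
        simp [PySem.List.pyGetD, PySem.List.pyGet?, PySem.List.pyIdx?]
    · -- step: 2 ≤ ys.length
      obtain ⟨M, k, hmem, hmax, hidx, hfold⟩ := ih hge
      have hys : ys ≠ [] := by intro h; subst h; simp at hge
      have hlast : PySem.List.pyGetD (ys ++ [x]) ((ys.length : Int)) 0 = x := by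
        rw [PySem.List.pyGetD_eq_getElem (ys ++ [x]) 0 (by positivity) (by simp)]
        simp
      have hprev : PySem.List.pyGetD (ys ++ [x]) ((ys.length : Int) - 1) 0 = ys.getLast hys := by
        rw [pvGetD_append_left ys [x] _ (by omega) (by omega),
            PySem.List.pyGetD_eq_getElem ys 0 (by omega) (by omega),
            List.getLast_eq_getElem]
        congr 1
        omega
      have hsums : pvSums (ys ++ [x]) = pvSums ys ++ [ys.getLast hys + x] :=
        pvSums_append ys hys x
      -- decompose the fold over pyRange 2 (len + 1)
      have hrange : PySem.List.pyRange 2 (((ys ++ [x]).length : Int)) 1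
          = PySem.List.pyRange 2 (ys.length : Int) 1 ++ [(ys.length : Int)] := by
        rw [show (((ys ++ [x]).length : Int)) = (ys.length : Int) + 1 by simp]
        exact PySem.List.pyRange_one_succ_right (by exact_mod_cast hge)
      have hinit0 : PySem.List.pyGetD (ys ++ [x]) 0 0 = PySem.List.pyGetD ys 0 0 :=
        pvGetD_append_left ys [x] 0 le_rfl (by exact_mod_cast Nat.lt_of_lt_of_le Nat.zero_lt_two hge)
      have hinit1 : PySem.List.pyGetD (ys ++ [x]) 1 0 = PySem.List.pyGetD ys 1 0 :=
        pvGetD_append_left ys [x] 1 Int.one_nonneg (by exact_mod_cast Nat.lt_of_lt_of_le Nat.one_lt_two hge)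
      have hcong : ∀ (st : Int × List Int) (i : Int), i ∈ PySem.List.pyRange 2 (ys.length : Int) 1 →
          pvStepA (ys ++ [x]) st i = pvStepA ys st i := by
        intro st i hi
        obtain ⟨hi1, hi2⟩ := PySem.List.mem_pyRange_one.mp hi
        unfold pvStepA
        rw [pvGetD_append_left ys [x] i (by omega) hi2,
            pvGetD_append_left ys [x] (i - 1) (by omega) (by omega)]
      have hfold' : (PySem.List.pyRange 2 (((ys ++ [x]).length : Int)) 1).foldl (pvStepA (ys ++ [x]))
            (PySem.List.pyGetD (ys ++ [x]) 0 0 + PySem.List.pyGetD (ys ++ [x]) 1 0, [0, 1])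
          = pvStepA (ys ++ [x]) (M, [(k : Int), (k : Int) + 1]) (ys.length : Int) := by
        rw [hrange, List.foldl_append, hinit0, hinit1,
            PySem.List.foldl_congr_mem _ _ _ _ hcong, hfold]
        rfl
      set c : Int := x + ys.getLast hys with hc
      have hstep : pvStepA (ys ++ [x]) (M, [(k : Int), (k : Int) + 1]) (ys.length : Int)
          = if M < c then (c, [(ys.length : Int) - 1, (ys.length : Int)]) else (M, [(k : Int), (k : Int) + 1]) := by
        unfold pvStepA
        rw [hlast, hprev]
      by_cases hMc : M < c
      · -- a new strict maximum appears at the appended pair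
        refine ⟨c, ys.length - 1, ?_, ?_, ?_, ?_⟩
        · rw [hsums, hc, add_comm]
          simp
        · intro y hy
          rw [hsums] at hy
          rcases List.mem_append.mp hy with hy | hy
          · exact le_of_lt (lt_of_le_of_lt (hmax y hy) hMc)
          · simp at hy; omega
        · have hnotin : c ∉ pvSums ys := by
            intro hin
            exact absurd (hmax c hin) (not_le.mpr hMc)
          rw [hsums, show ys.getLast hys + x = c by rw [hc]; ring,
              PySem.List.index?_append_singleton_self _ _ hnotin, pvSums_length]
        · rw [hfold', hstep, if_pos hMc]
          have h1 : ((ys.length - 1 : Nat) : Int) = (ys.length : Int) - 1 := by omega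
          rw [h1, sub_add_cancel]
      · -- the old maximum survives
        refine ⟨M, k, ?_, ?_, ?_, ?_⟩
        · rw [hsums]; exact List.mem_append.mpr (Or.inl hmem)
        · intro y hy
          rw [hsums] at hy
          rcases List.mem_append.mp hy with hy | hy
          · exact hmax y hy
          · simp at hy; omega
        · rw [hsums, PySem.List.index?_append_of_mem _ hmem, hidx]
        · rw [hfold', hstep, if_neg hMc]

-- B evaluated through the invariant data
lemma alt_eq_of_inv (items : List Int) (M : Int) (k : Nat)
    (hmem : M ∈ pvSums items) (hmax : ∀ y ∈ pvSums items, y ≤ M)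
    (hidx : PySem.List.index? (pvSums items) M = some k) :
    max_pair_indices_alt items = some [(k : Int), (k : Int) + 1] := by
  unfold max_pair_indices_alt
  have hne : pvSums items ≠ [] := by intro h; rw [h] at hmem; exact absurd hmem (by simp)
  obtain ⟨m, hm⟩ : ∃ m, PySem.List.max? (pvSums items) (fun x => x) = some m := by
    cases hmo : PySem.List.max? (pvSums items) (fun x => x) with
    | none => exact absurd ((PySem.List.max?_eq_none_iff _ _).mp hmo) hne
    | some m => exact ⟨m, rfl⟩
  have hmmem := PySem.List.max?_mem hm
  have hmmax := PySem.List.max?_isMax hm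
  have : m = M := le_antisymm (hmax m hmmem) (hmmax M hmem)
  simp only [hm, this, hidx]

-- ===== VERDICT (by name: the statement is the Claim_ definition above) =====
theorem max_pair_indices_spec : Claim_equal_max_pair_indices := by
  intro items _
  unfold Spec_max_pair_indices
  by_cases hlt : items.length < 2
  · -- both None
    have hnil : pvSums items = [] := by
      match items, hlt with
      | [], _ => rfl
      | [a], _ => rfl
    rw [max_pair_indices, if_pos hlt]
    unfold max_pair_indices_alt
    rw [hnil]
    rfl
  · rw [Nat.not_lt] at hlt
    obtain ⟨M, k, hmem, hmax, hidx, hfold⟩ := loopA_inv items hlt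
    rw [alt_eq_of_inv items M k hmem hmax hidx]
    by_cases h2 : items.length = 2
    · -- A returns [0,1]; the invariant forces k = 0 on the singleton sums list
      rw [max_pair_indices, if_neg (by omega), if_pos h2]
      obtain ⟨a, b, hab⟩ := List.length_eq_two.mp h2
      subst hab
      have hm : M = a + b := by
        have := hmem; rw [show pvSums [a, b] = [a + b] from rfl] at this; simpa using this
      subst hm
      have hk : k = 0 := by
        have := hidx
        rw [show pvSums [a, b] = [a + b] from rfl, PySem.List.index?_cons_self] at this
        exact (Option.some.inj this).symm
      simp [hk]
    · rw [max_pair_indices, if_neg (by omega), if_neg h2, hfold]
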